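-- pv_equiv track=rewrite | github.com/watchduck/discrete_helpers | discretehelpers/a/_atompatterns/__init__.py | make_atompattern_gen
-- ===== SOURCE A (Python) =====
-- def make_atompattern_gen(signed_atomval, arity, negate=False):
--     negated_with_tilda = signed_atomval < 0
--     abs_atomval = ~signed_atomval if negated_with_tilda else signed_atomval
--     assert abs_atomval < arity
--     length = 1 << arity  # 2 ** arity
--     half_period_length = 1 << abs_atomval  # 2 ** atomval
--     period_length = half_period_length << 1  # half_period_length * 2
--     if negate ^ negated_with_tilda:
--         for i in range(length):
--             yield i % period_length < half_period_length
--     else: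
--         for i in range(length):
--             yield i % period_length >= half_period_length
-- ===== SOURCE B (Python) =====
-- def make_atompattern_gen(signed_atomval, arity, negate=False):
--     negated_with_tilda = signed_atomval < 0
--     abs_atomval = ~signed_atomval if negated_with_tilda else signed_atomval
--     assert abs_atomval < arity
--     flip = negate ^ negated_with_tilda
--     block = [flip] * (1 << abs_atomval) + [not flip] * (1 << abs_atomval)
--     for _ in range(arity - 1 - abs_atomval):
--         block = block + block
--     yield from block
-- ===== Notes on version B (the rewrite author's own statement) =====
-- stated objective: alternative
-- what changed: B builds the base period as two replicated half-blocks and grows the full pattern by repeated doubling (block = block + block, arity-1-abs_atomval times), eliminating A's per-element i % period_length test over range(2**arity).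
import Mathlib
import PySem

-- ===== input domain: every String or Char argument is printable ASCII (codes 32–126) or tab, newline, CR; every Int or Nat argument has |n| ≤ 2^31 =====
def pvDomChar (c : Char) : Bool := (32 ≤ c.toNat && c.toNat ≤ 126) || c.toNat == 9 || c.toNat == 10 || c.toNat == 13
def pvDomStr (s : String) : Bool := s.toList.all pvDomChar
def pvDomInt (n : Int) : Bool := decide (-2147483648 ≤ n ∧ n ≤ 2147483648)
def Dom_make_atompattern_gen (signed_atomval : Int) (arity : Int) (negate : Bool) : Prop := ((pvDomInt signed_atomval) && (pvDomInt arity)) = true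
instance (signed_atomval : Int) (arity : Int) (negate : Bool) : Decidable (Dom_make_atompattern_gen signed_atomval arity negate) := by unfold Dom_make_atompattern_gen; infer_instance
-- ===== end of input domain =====

-- ===== PORT A =====
-- B builds the base period once and grows the full pattern by repeated doubling,
-- replacing A's per-element modulo test (objective: alternative; same asymptotic cost).
-- A is a generator; its body (including the assert) runs on iteration. '1 << arity' /
-- '1 << abs_atomval' are ported as 2 ^ toNat: exact since Pre_ forces abs_atomval ≥ 0 and arity ≥ 1.
def make_atompattern_gen (signed_atomval : Int) (arity : Int) (negate : Bool) : List Bool :=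
  let negated_with_tilda : Bool := decide (signed_atomval < 0)
  let abs_atomval : Int := if signed_atomval < 0 then -signed_atomval - 1 else signed_atomval
  let length : Nat := 2 ^ arity.toNat
  let half_period_length : Nat := 2 ^ abs_atomval.toNat
  let period_length : Nat := half_period_length * 2
  if negate ≠ negated_with_tilda then
    (List.range length).map (fun i => decide (i % period_length < half_period_length))
  else
    (List.range length).map (fun i => decide (half_period_length ≤ i % period_length))

-- ===== PORT B =====
def make_atompattern_gen_alt (signed_atomval : Int) (arity : Int) (negate : Bool) : List Bool :=
  let negated_with_tilda : Bool := decide (signed_atomval < 0)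
  let abs_atomval : Int := if signed_atomval < 0 then -signed_atomval - 1 else signed_atomval
  let flip : Bool := negate != negated_with_tilda
  let block : List Bool :=
    List.replicate (2 ^ abs_atomval.toNat) flip ++ List.replicate (2 ^ abs_atomval.toNat) (!flip)
  (List.range (arity - 1 - abs_atomval).toNat).foldl (fun b _ => b ++ b) block

-- ===== PRECONDITION & SPEC =====
-- Pre_ excludes exactly the inputs on which A's 'assert abs_atomval < arity' fails
-- (AssertionError on iteration of the generator).
def Pre_make_atompattern_gen (signed_atomval : Int) (arity : Int) (negate : Bool) : Prop :=
  (if signed_atomval < 0 then -signed_atomval - 1 else signed_atomval) < arity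
instance (signed_atomval : Int) (arity : Int) (negate : Bool) : Decidable (Pre_make_atompattern_gen signed_atomval arity negate) := by unfold Pre_make_atompattern_gen; infer_instance
def pvWitness_make_atompattern_gen : Int × Int × Bool := (-2, 3, false)
def Spec_make_atompattern_gen (signed_atomval : Int) (arity : Int) (negate : Bool) (out : List Bool) : Prop := out = make_atompattern_gen_alt signed_atomval arity negate
instance (signed_atomval : Int) (arity : Int) (negate : Bool) (out : List Bool) : Decidable (Spec_make_atompattern_gen signed_atomval arity negate out) := by unfold Spec_make_atompattern_gen; infer_instance

-- ===== CLAIM (what is proved, stated in full; the proofs are below) =====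
def Claim_equal_make_atompattern_gen : Prop := ∀ (signed_atomval : Int) (arity : Int) (negate : Bool), Dom_make_atompattern_gen signed_atomval arity negate → Pre_make_atompattern_gen signed_atomval arity negate → Spec_make_atompattern_gen signed_atomval arity negate (make_atompattern_gen signed_atomval arity negate)

-- ===== LEMMAS AND PROOFS =====

-- Doubling n times = 2^n concatenated copies of the block.
theorem pv_foldl_double (n : Nat) (block : List Bool) :
    (List.range n).foldl (fun b _ => b ++ b) block
      = (List.range (2 ^ n)).flatMap (fun _ => block) := by
  induction n with
  | zero => simp
  | succ m ih =>
    rw [List.range_succ, List.foldl_append, ih]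
    have : (2:Nat) ^ (m + 1) = 2 ^ m + 2 ^ m := by ring
    rw [this, List.range_add, List.flatMap_append]
    simp [List.flatMap_map]

-- Unrolling a periodic map over range (num * p) into num copies of one period.
theorem pv_map_mod_flatMap (f : Nat → Bool) (p num : Nat) :
    (List.range (num * p)).map (fun i => f (i % p))
      = (List.range num).flatMap (fun _ => (List.range p).map (fun i => f (i % p))) := by
  induction num with
  | zero => simp
  | succ n ih =>
    rw [Nat.succ_mul, List.range_add, List.map_append, ih,
        List.range_succ, List.flatMap_append]
    simp [List.map_map, Function.comp]

theorem pv_period_true (h : Nat) :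
    (List.range (h * 2)).map (fun i => decide (i % (h * 2) < h))
      = List.replicate h true ++ List.replicate h false := by
  have h2 : h * 2 = h + h := by omega
  rw [h2, List.range_add, List.map_append]
  congr 1
  · rw [List.eq_replicate_iff]
    refine ⟨by simp, ?_⟩
    intro b hb
    simp only [List.mem_map, List.mem_range] at hb
    obtain ⟨i, hi, rfl⟩ := hb
    rw [Nat.mod_eq_of_lt (by omega)]
    simp [hi]
  · rw [List.map_map, List.eq_replicate_iff]
    refine ⟨by simp, ?_⟩
    intro b hb
    simp only [List.mem_map, List.mem_range, Function.comp] at hb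
    obtain ⟨i, hi, rfl⟩ := hb
    rw [Nat.mod_eq_of_lt (by omega)]
    simp

theorem pv_period_false (h : Nat) :
    (List.range (h * 2)).map (fun i => decide (h ≤ i % (h * 2)))
      = List.replicate h false ++ List.replicate h true := by
  have h2 : h * 2 = h + h := by omega
  rw [h2, List.range_add, List.map_append]
  congr 1
  · rw [List.eq_replicate_iff]
    refine ⟨by simp, ?_⟩
    intro b hb
    simp only [List.mem_map, List.mem_range] at hb
    obtain ⟨i, hi, rfl⟩ := hb
    rw [Nat.mod_eq_of_lt (by omega)]
    simp [hi]
  · rw [List.map_map, List.eq_replicate_iff]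
    refine ⟨by simp, ?_⟩
    intro b hb
    simp only [List.mem_map, List.mem_range, Function.comp] at hb
    obtain ⟨i, hi, rfl⟩ := hb
    rw [Nat.mod_eq_of_lt (by omega)]
    simp

-- ===== VERDICT (by name: the statement is the Claim_ definition above) =====
theorem make_atompattern_gen_spec : Claim_equal_make_atompattern_gen := by
  intro s a negate _ hpre
  unfold Spec_make_atompattern_gen make_atompattern_gen make_atompattern_gen_alt
  set abs : Int := if s < 0 then -s - 1 else s with habs
  have habs0 : 0 ≤ abs := by rw [habs]; split <;> omega
  have hlt : abs.toNat < a.toNat := by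
    unfold Pre_make_atompattern_gen at hpre
    rw [← habs] at hpre
    omega
  have hn : (a - 1 - abs).toNat = a.toNat - 1 - abs.toNat := by omega
  have hexp : 2 ^ a.toNat = 2 ^ (a.toNat - 1 - abs.toNat) * (2 ^ abs.toNat * 2) := by
    have : 2 ^ abs.toNat * 2 = 2 ^ (abs.toNat + 1) := by ring
    rw [this, ← pow_add]
    congr 1
    omega
  simp only
  rw [pv_foldl_double, hn]
  by_cases hc : negate = decide (s < 0)
  · simp only [hc, ne_eq, not_true, if_false, bne_self_eq_false, Bool.not_false]
    conv_lhs => rw [hexp]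
    rw [pv_map_mod_flatMap (fun j => decide (2 ^ abs.toNat ≤ j)) (2 ^ abs.toNat * 2),
        pv_period_false]
  · have hb : (negate != decide (s < 0)) = true := by
      simp [bne_iff_ne, hc]
    simp only [ne_eq, hc, not_false_iff, if_true, hb, Bool.not_true]
    conv_lhs => rw [hexp]
    rw [pv_map_mod_flatMap (fun j => decide (j < 2 ^ abs.toNat)) (2 ^ abs.toNat * 2),
        pv_period_true]
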